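-- pv_equiv track=rewrite | github.com/Dylkln/Projet_BWT | modules/BWT.py | gen_pos
-- ===== SOURCE A (Python) =====
-- from operator import itemgetter
--
-- def gen_pos(index_seq, transformed):
--     """
--     Retrieve the character position in the start sequence
--     """
--
--     transformed_length = len(transformed)
--
--     couple_index_base = sorted([(i, x) for i, x in enumerate(transformed)], key = itemgetter(1))
--     index_transformed = [None for i in range(transformed_length)]
--
--     for index, couple in enumerate(couple_index_base):
--         j,_ = couple
--         index_transformed[j] = index
--
--     return transformed_length, index_transformed
-- ===== SOURCE B (Python) =====
-- def gen_pos(index_seq, transformed):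
--     """
--     Retrieve the character position in the start sequence
--     (stable counting sort over the character codes instead of sorting pairs)
--     """
--     n = len(transformed)
--     counts = [0] * 256
--     for ch in transformed:
--         counts[ord(ch)] = counts[ord(ch)] + 1
--     offsets = [0] * 256
--     total = 0
--     for v in range(256):
--         offsets[v] = total
--         total = total + counts[v]
--     ranks = []
--     for ch in transformed:
--         v = ord(ch)
--         ranks.append(offsets[v])
--         offsets[v] = offsets[v] + 1
--     return n, ranks
-- ===== Notes on version B (the rewrite author's own statement) =====
-- stated objective: faster
-- what changed: Replaces sorting the (index, char) pairs and scattering their sorted positions by a stable counting sort over the 256-entry character-code alphabet (count, prefix-sum, one assignment pass).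
import Mathlib
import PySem

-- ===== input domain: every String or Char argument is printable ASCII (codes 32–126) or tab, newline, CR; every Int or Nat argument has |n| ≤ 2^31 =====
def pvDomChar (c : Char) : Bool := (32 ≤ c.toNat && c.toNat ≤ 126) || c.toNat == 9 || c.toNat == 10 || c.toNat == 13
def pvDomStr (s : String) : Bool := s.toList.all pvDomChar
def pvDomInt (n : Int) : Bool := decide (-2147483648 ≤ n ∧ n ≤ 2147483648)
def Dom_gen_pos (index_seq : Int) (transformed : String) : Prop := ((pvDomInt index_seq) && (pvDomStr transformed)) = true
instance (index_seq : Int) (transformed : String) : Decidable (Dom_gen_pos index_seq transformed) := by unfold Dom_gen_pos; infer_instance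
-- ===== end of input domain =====

-- B replaces sorting the (index, char) pairs by a stable counting sort over the 256-code alphabet (faster).


-- ===== PORT A =====
-- literal port of A: sort enumerate(transformed) stably by the character, then scatter
-- each sorted position into the cell named by the original index.  '[None]*n' is ported
-- as a list of sentinel 0s: the loop assigns every cell exactly once (proved below).
def gen_pos (index_seq : Int) (transformed : String) : Int × List Int :=
  let transformed_length : Int := PySem.Str.len transformed
  let couple_index_base :=
    PySem.List.sorted (PySem.List.enumerate transformed.toList) (fun p => p.2) false
  let init : List Int := (PySem.List.pyRange 0 transformed_length 1).map (fun _ => 0)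
  let index_transformed :=
    (PySem.List.enumerate couple_index_base).foldl
      (fun acc p => PySem.List.pySetD acc p.2.1 p.1) init
  (transformed_length, index_transformed)

-- ===== PORT B =====
-- literal port of Source B: counting sort (count, prefix sums, one assignment pass).
def gen_pos_alt (index_seq : Int) (transformed : String) : Int × List Int :=
  let cs := transformed.toList
  let n : Int := PySem.Str.len transformed
  let counts : List Int := cs.foldl (fun acc ch =>
      PySem.List.pySetD acc (ch.toNat : Int) (PySem.List.pyGetD acc (ch.toNat : Int) 0 + 1))
    (List.replicate 256 0)
  let offsets : List Int := ((PySem.List.pyRange 0 256 1).foldl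
      (fun (st : List Int × Int) v =>
        (PySem.List.pySetD st.1 v st.2, st.2 + PySem.List.pyGetD counts v 0))
      (List.replicate 256 0, 0)).1
  let ranks : List Int := (cs.foldl (fun (st : List Int × List Int) ch =>
      (st.1 ++ [PySem.List.pyGetD st.2 (ch.toNat : Int) 0],
       PySem.List.pySetD st.2 (ch.toNat : Int) (PySem.List.pyGetD st.2 (ch.toNat : Int) 0 + 1)))
      ([], offsets)).1
  (n, ranks)

-- ===== PRECONDITION & SPEC =====
def Spec_gen_pos (index_seq : Int) (transformed : String) (out : Int × List Int) : Prop := out = gen_pos_alt index_seq transformed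
instance (index_seq : Int) (transformed : String) (out : Int × List Int) : Decidable (Spec_gen_pos index_seq transformed out) := by unfold Spec_gen_pos; infer_instance

-- ===== CLAIM (what is proved, stated in full; the proofs are below) =====
def Claim_equal_gen_pos : Prop := ∀ (index_seq : Int) (transformed : String), Dom_gen_pos index_seq transformed → Spec_gen_pos index_seq transformed (gen_pos index_seq transformed)

-- ===== LEMMAS AND PROOFS =====

-- the closed-form "stable rank" both algorithms compute
def pvCntLt (cs : List Char) (v : Nat) : Int := (cs.countP (fun d => decide (d.toNat < v)) : Int)
def pvCntEq (cs : List Char) (v : Nat) : Int := (cs.countP (fun d => decide (d.toNat = v)) : Int)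
def pvRank (cs : List Char) (j : Nat) : Int :=
  pvCntLt cs (cs.getD j default).toNat + pvCntEq (cs.take j) (cs.getD j default).toNat
def pvRankList (cs : List Char) : List Int := (List.range cs.length).map (pvRank cs)

theorem char_lt_iff (a b : Char) : (a < b) ↔ a.toNat < b.toNat := by
  simp [Char.lt_def, UInt32.lt_iff_toNat_lt]

theorem char_eq_iff (a b : Char) : (a = b) ↔ a.toNat = b.toNat := by
  constructor
  · intro h; rw [h]
  · intro h; exact Char.ext (UInt32.toNat_inj.mp h)

theorem getD_pySetD (xs : List Int) (n m : Nat) (v d : Int) (h : n < xs.length) :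
    (PySem.List.pySetD xs (n : Int) v).getD m d = if m = n then v else xs.getD m d := by
  rw [← PySem.List.pyGetD_natCast, PySem.List.pyGetD_pySetD_natCast xs n m v d h,
      PySem.List.pyGetD_natCast]

theorem pySetD_of_le (xs : List Int) (n : Nat) (v : Int) (h : xs.length ≤ n) :
    PySem.List.pySetD xs (n : Int) v = xs := by
  have h1 : PySem.List.pyIdx? xs.length (n : Int) = none := by
    simp only [PySem.List.pyIdx?]
    rw [if_pos (by omega), if_neg (by omega)]
  simp [PySem.List.pySetD, PySem.List.pySet?, h1]

theorem getD_replicate_int (n v : Nat) : (List.replicate n (0 : Int)).getD v 0 = 0 := by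
  rcases lt_or_ge v n with h | h
  · simp [List.getD, h]
  · rw [List.getD, List.getElem?_eq_none (by simpa using h)]
    rfl

-- ---------- B side ----------

theorem cntLt_succ_nat (cs : List Char) (m : Nat) :
    cs.countP (fun d => decide (d.toNat < m + 1))
      = cs.countP (fun d => decide (d.toNat < m)) + cs.countP (fun d => decide (d.toNat = m)) := by
  induction cs with
  | nil => simp
  | cons c t ih =>
    rw [List.countP_cons, List.countP_cons, List.countP_cons, ih]
    by_cases h1 : c.toNat < m
    · rw [if_pos (by simp; omega), if_pos (by simp [h1]), if_neg (by simp; omega)]; omega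
    · by_cases h2 : c.toNat = m
      · rw [if_pos (by simp; omega), if_neg (by simp [h1]), if_pos (by simp [h2])]; omega
      · rw [if_neg (by simp; omega), if_neg (by simp [h1]), if_neg (by simp [h2])]; omega
  
theorem cntLt_succ (cs : List Char) (m : Nat) :
    pvCntLt cs (m + 1) = pvCntLt cs m + pvCntEq cs m := by
  unfold pvCntLt pvCntEq
  rw [cntLt_succ_nat]
  push_cast
  ring

theorem counts_getD (cs : List Char) (init : List Int) (hi : init.length = 256)
    (hc : ∀ c ∈ cs, c.toNat < 256) (v : Nat) :
    (cs.foldl (fun acc ch =>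
      PySem.List.pySetD acc (ch.toNat : Int) (PySem.List.pyGetD acc (ch.toNat : Int) 0 + 1)) init).getD v 0
      = init.getD v 0 + pvCntEq cs v := by
  induction cs generalizing init with
  | nil => simp [pvCntEq]
  | cons c t ih =>
    have hcv : c.toNat < init.length := by rw [hi]; exact hc c (by simp)
    rw [List.foldl_cons, ih _ (by rw [PySem.List.length_pySetD]; exact hi)
        (fun x hx => hc x (by simp [hx]))]
    rw [PySem.List.pyGetD_natCast, getD_pySetD _ _ _ _ _ hcv]
    simp only [pvCntEq, List.countP_cons]
    by_cases hvc : v = c.toNat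
    · simp [hvc]; push_cast; omega
    · have : ¬ c.toNat = v := fun h => hvc h.symm
      simp [hvc, this]

-- prefix-sum loop invariant
theorem offsets_spec (counts : List Int) (m : Nat) (hm : m ≤ 256) :
    (((List.range m).foldl (fun (st : List Int × Int) (v : Nat) =>
        (PySem.List.pySetD st.1 (v : Int) st.2, st.2 + PySem.List.pyGetD counts (v : Int) 0))
      (List.replicate 256 0, 0)).1.length = 256)
    ∧ (((List.range m).foldl (fun (st : List Int × Int) (v : Nat) =>
        (PySem.List.pySetD st.1 (v : Int) st.2, st.2 + PySem.List.pyGetD counts (v : Int) 0))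
      (List.replicate 256 0, 0)).2 = (List.range m).foldl (fun t u => t + counts.getD u 0) 0)
    ∧ ∀ v : Nat, (((List.range m).foldl (fun (st : List Int × Int) (v : Nat) =>
        (PySem.List.pySetD st.1 (v : Int) st.2, st.2 + PySem.List.pyGetD counts (v : Int) 0))
      (List.replicate 256 0, 0)).1.getD v 0
        = if v < m then (List.range v).foldl (fun t u => t + counts.getD u 0) 0 else 0) := by
  induction m with
  | zero =>
    refine ⟨by rw [List.range_zero, List.foldl_nil]; exact List.length_replicate, by rfl, fun v => ?_⟩
    rw [List.range_zero, List.foldl_nil, if_neg (Nat.not_lt_zero v)]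
    exact getD_replicate_int 256 v
  | succ m ih =>
    obtain ⟨hlen, hsum, hget⟩ := ih (by omega)
    rw [List.range_succ]
    refine ⟨?_, ?_, ?_⟩
    · rw [List.foldl_append, List.foldl_cons, List.foldl_nil, PySem.List.length_pySetD]; exact hlen
    · rw [List.foldl_append, List.foldl_cons, List.foldl_nil, List.foldl_append, List.foldl_cons,
        List.foldl_nil, hsum, PySem.List.pyGetD_natCast]
    · intro v
      rw [List.foldl_append, List.foldl_cons, List.foldl_nil,
        getD_pySetD _ _ _ _ _ (by rw [hlen]; omega), hsum]
      by_cases hv : v = m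
      · simp [hv]
      · rw [if_neg hv, hget v]
        by_cases h1 : v < m
        · rw [if_pos h1, if_pos (by omega)]
        · rw [if_neg h1, if_neg (by omega)]

theorem foldl_counts_eq_cntLt (cs : List Char) (init : List Int) (hi : init.length = 256)
    (hc : ∀ c ∈ cs, c.toNat < 256) (hz : ∀ v : Nat, init.getD v 0 = 0) (m : Nat) (hm : m ≤ 256) :
    (List.range m).foldl (fun t u => t +
        (cs.foldl (fun acc ch =>
          PySem.List.pySetD acc (ch.toNat : Int) (PySem.List.pyGetD acc (ch.toNat : Int) 0 + 1)) init).getD u 0) 0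
      = pvCntLt cs m := by
  induction m with
  | zero => simp [pvCntLt]
  | succ m ih =>
    rw [List.range_succ, List.foldl_append, List.foldl_cons, List.foldl_nil, ih (by omega),
      counts_getD cs init hi hc m, hz m, cntLt_succ]
    ring

-- the emission pass, abstracted over the running-offset table read as a function
def pvEmit (f : Nat → Int) : List Char → List Int
  | [] => []
  | c :: t => f c.toNat :: pvEmit (fun v => if v = c.toNat then f v + 1 else f v) t

theorem pvEmit_congr (f g : Nat → Int) (cs : List Char) (h : ∀ v < 256, f v = g v)
    (hc : ∀ c ∈ cs, c.toNat < 256) : pvEmit f cs = pvEmit g cs := by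
  induction cs generalizing f g with
  | nil => rfl
  | cons c t ih =>
    simp only [pvEmit]
    refine congrArg₂ _ (h c.toNat (hc c (by simp))) (ih _ _ ?_ (fun x hx => hc x (by simp [hx])))
    intro v hv
    by_cases hvc : v = c.toNat <;> simp [hvc, h _ hv, h c.toNat (hc c (by simp))]

theorem ranks_loop (cs : List Char) (o : List Int) (out : List Int) (ho : o.length = 256)
    (hc : ∀ c ∈ cs, c.toNat < 256) :
    (cs.foldl (fun (st : List Int × List Int) ch =>
      (st.1 ++ [PySem.List.pyGetD st.2 (ch.toNat : Int) 0],
       PySem.List.pySetD st.2 (ch.toNat : Int) (PySem.List.pyGetD st.2 (ch.toNat : Int) 0 + 1)))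
      (out, o)).1 = out ++ pvEmit (fun v => o.getD v 0) cs := by
  induction cs generalizing o out with
  | nil => simp [pvEmit]
  | cons c t ih =>
    have hcl : c.toNat < o.length := by rw [ho]; exact hc c (by simp)
    rw [List.foldl_cons, ih _ _ (by rw [PySem.List.length_pySetD]; exact ho)
      (fun x hx => hc x (by simp [hx]))]
    simp only [pvEmit, PySem.List.pyGetD_natCast]
    rw [List.append_assoc, List.singleton_append]
    congr 2
    apply pvEmit_congr _ _ _ _ (fun x hx => hc x (by simp [hx]))
    intro v _
    rw [getD_pySetD _ _ _ _ _ hcl]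
    by_cases hvc : v = c.toNat <;> simp [hvc]

theorem pvEmit_rank (cs : List Char) (rest pre : List Char) (h : cs = pre ++ rest) :
    pvEmit (fun v => pvCntLt cs v + pvCntEq pre v) rest
      = (List.range rest.length).map (fun j => pvRank cs (pre.length + j)) := by
  induction rest generalizing pre with
  | nil => simp [pvEmit]
  | cons c t ih =>
    simp only [pvEmit]
    have hhead : pvCntLt cs c.toNat + pvCntEq pre c.toNat = pvRank cs pre.length := by
      have h1 : cs.getD pre.length default = c := by
        subst h; simp [List.getD]
      have h2 : cs.take pre.length = pre := by subst h; simp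
      rw [pvRank, h1, h2]
    have hstep : (fun v => if v = c.toNat then (pvCntLt cs v + pvCntEq pre v) + 1
          else pvCntLt cs v + pvCntEq pre v)
        = fun v => pvCntLt cs v + pvCntEq (pre ++ [c]) v := by
      funext v
      simp only [pvCntEq, List.countP_append, List.countP_cons, List.countP_nil]
      by_cases hvc : v = c.toNat
      · subst hvc
        simp only [decide_true, if_true]
        push_cast
        ring
      · have h2 : ¬ c.toNat = v := fun hh => hvc hh.symm
        simp [hvc, h2]
    rw [hhead, hstep, ih (pre ++ [c]) (by rw [h, List.append_assoc]; rfl)]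
    rw [List.length_cons, List.range_succ_eq_map, List.map_cons, List.map_map, Nat.add_zero]
    congr 1
    apply List.map_congr_left
    intro j _
    simp only [Function.comp_apply, List.length_append, List.length_cons, List.length_nil]
    congr 1
    omega

-- B's result equals the rank list
theorem B_chain (cs : List Char) (hc : ∀ c ∈ cs, c.toNat < 256) :
    (cs.foldl (fun (st : List Int × List Int) ch =>
      (st.1 ++ [PySem.List.pyGetD st.2 (ch.toNat : Int) 0],
       PySem.List.pySetD st.2 (ch.toNat : Int) (PySem.List.pyGetD st.2 (ch.toNat : Int) 0 + 1)))
      (([] : List Int), ((PySem.List.pyRange 0 256 1).foldl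
        (fun (st : List Int × Int) v =>
          (PySem.List.pySetD st.1 v st.2, st.2 + PySem.List.pyGetD (cs.foldl (fun acc ch =>
            PySem.List.pySetD acc (ch.toNat : Int) (PySem.List.pyGetD acc (ch.toNat : Int) 0 + 1))
            (List.replicate 256 0)) v 0))
        (List.replicate 256 0, 0)).1)).1 = pvRankList cs := by
  have h256 : (256 : Int) = ((256 : Nat) : Int) := by norm_num
  rw [h256, PySem.List.pyRange_zero_natCast, List.foldl_map]
  obtain ⟨hlen, _, hget⟩ := offsets_spec (cs.foldl (fun acc ch =>
      PySem.List.pySetD acc (ch.toNat : Int) (PySem.List.pyGetD acc (ch.toNat : Int) 0 + 1))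
      (List.replicate 256 0)) 256 le_rfl
  rw [ranks_loop cs _ [] hlen hc, List.nil_append]
  rw [pvEmit_congr _ (fun v => pvCntLt cs v + pvCntEq ([] : List Char) v) cs ?_ hc]
  · rw [pvEmit_rank cs cs [] rfl]
    unfold pvRankList
    simp
  · intro v hv
    rw [hget v, if_pos hv,
      foldl_counts_eq_cntLt cs (List.replicate 256 0) List.length_replicate hc
        (getD_replicate_int 256) v (by omega)]
    show pvCntLt cs v = pvCntLt cs v + pvCntEq ([] : List Char) v
    have hz : pvCntEq ([] : List Char) v = 0 := rfl
    rw [hz, add_zero]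

theorem B_ranks (i : Int) (s : String) (hc : ∀ c ∈ s.toList, c.toNat < 256) :
    (gen_pos_alt i s).2 = pvRankList s.toList :=
  B_chain s.toList hc

-- ---------- A side ----------

abbrev pvLexLt (a b : Int × Char) : Prop := a.2 < b.2 ∨ (a.2 = b.2 ∧ a.1 < b.1)

theorem pvLexLt_irrefl (a : Int × Char) : ¬ pvLexLt a a := by
  simp [pvLexLt]

theorem pvLexLt_asymm (a b : Int × Char) (h1 : pvLexLt a b) (h2 : pvLexLt b a) : False := by
  rcases h1 with h1 | ⟨e1, l1⟩ <;> rcases h2 with h2 | ⟨e2, l2⟩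
  · exact absurd h2 (lt_asymm h1)
  · exact absurd h1 (by rw [e2]; exact lt_irrefl _)
  · exact absurd h2 (by rw [e1]; exact lt_irrefl _)
  · omega

theorem insertBy_pairwise (x : Int × Char) (acc : List (Int × Char))
    (h : acc.Pairwise pvLexLt) (hf : ∀ y ∈ acc, y.1 < x.1) :
    (PySem.List.insertBy (fun a b => decide (a.2 < b.2)) x acc).Pairwise pvLexLt := by
  induction acc with
  | nil => simp [PySem.List.insertBy]
  | cons y ys ih =>
    rw [show PySem.List.insertBy (fun a b => decide (a.2 < b.2)) x (y :: ys)
        = if decide (x.2 < y.2) then x :: y :: ys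
          else y :: PySem.List.insertBy (fun a b => decide (a.2 < b.2)) x ys from rfl]
    rw [List.pairwise_cons] at h
    obtain ⟨hy, hys⟩ := h
    by_cases hlt : x.2 < y.2
    · simp only [hlt, decide_true, if_true]
      refine List.pairwise_cons.mpr ⟨?_, List.pairwise_cons.mpr ⟨hy, hys⟩⟩
      intro z hz
      rcases hz with _ | hz
      · exact Or.inl hlt
      · rcases hy z (by assumption) with h | ⟨e, _⟩
        · exact Or.inl (lt_trans hlt h)
        · exact Or.inl (e ▸ hlt)
    · simp only [hlt, decide_false, if_false]
      refine List.pairwise_cons.mpr ⟨?_, ih hys (fun z hz => hf z (by simp [hz]))⟩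
      intro z hz
      rcases (PySem.List.mem_insertBy _ _ _ _).mp hz with rfl | hz
      · rcases lt_or_eq_of_le (le_of_not_gt hlt) with h | h
        · exact Or.inl h
        · exact Or.inr ⟨h, hf y (by simp)⟩
      · exact hy z hz

theorem foldl_ins_pairwise (xs : List (Int × Char)) (acc : List (Int × Char))
    (h : acc.Pairwise pvLexLt) (hfa : ∀ y ∈ acc, ∀ x ∈ xs, y.1 < x.1)
    (hx : xs.Pairwise (fun a b => a.1 < b.1)) :
    (xs.foldl (fun acc x => PySem.List.insertBy (fun a b => decide (a.2 < b.2)) x acc) acc).Pairwise pvLexLt := by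
  induction xs generalizing acc with
  | nil => exact h
  | cons x t ih =>
    rw [List.pairwise_cons] at hx
    rw [List.foldl_cons]
    apply ih
    · exact insertBy_pairwise x acc h (fun y hy => hfa y hy x (by simp))
    · intro y hy z hz
      rcases (PySem.List.mem_insertBy _ _ _ _).mp hy with rfl | hy
      · exact hx.1 z hz
      · exact hfa y hy z (by simp [hz])
    · exact hx.2

theorem enum_fst_ge (cs : List Char) (s : Int) : ∀ p ∈ PySem.List.enumerate cs s, s ≤ p.1 := by
  induction cs generalizing s with
  | nil => simp [PySem.List.enumerate]
  | cons c t ih =>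
    intro p hp
    rw [PySem.List.enumerate_cons] at hp
    rcases hp with _ | hp
    · simp
    · have := ih (s + 1) p (by assumption)
      omega

theorem enum_pairwise_fst (cs : List Char) (s : Int) :
    (PySem.List.enumerate cs s).Pairwise (fun a b => a.1 < b.1) := by
  induction cs generalizing s with
  | nil => simp [PySem.List.enumerate]
  | cons c t ih =>
    rw [PySem.List.enumerate_cons, List.pairwise_cons]
    exact ⟨fun p hp => by have := enum_fst_ge t (s+1) p hp; simp; omega, ih (s+1)⟩

theorem sorted_pairwise_lex (cs : List Char) :
    (PySem.List.sorted (PySem.List.enumerate cs 0) (fun p => p.2) false).Pairwise pvLexLt := by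
  rw [PySem.List.sorted_eq_foldl_insertBy]
  exact foldl_ins_pairwise _ [] (by simp) (by simp) (enum_pairwise_fst cs 0)

theorem pos_eq_countP (S : List (Int × Char)) (h : S.Pairwise pvLexLt) (k : Nat) (hk : k < S.length) :
    S.countP (fun p => decide (pvLexLt p S[k])) = k := by
  obtain ⟨e, he⟩ : ∃ e, S[k] = e := ⟨_, rfl⟩
  have hsplit : S = S.take k ++ e :: S.drop (k + 1) := by
    conv_lhs => rw [← List.take_append_drop k S]
    rw [List.drop_eq_getElem_cons hk, he]
  rw [List.pairwise_iff_getElem] at h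
  rw [he]
  conv_lhs => rw [hsplit]
  rw [List.countP_append, List.countP_cons]
  have h1 : (S.take k).countP (fun p => decide (pvLexLt p e)) = (S.take k).length := by
    rw [List.countP_eq_length]
    intro a ha
    obtain ⟨i, hi, rfl⟩ := List.mem_iff_getElem.mp ha
    rw [List.getElem_take]
    have hik : i < k ∧ i < S.length := by simpa using hi
    exact decide_eq_true (he ▸ h i k (by omega) hk hik.1)
  have h2 : (decide (pvLexLt e e) : Bool) = false := by
    simp [pvLexLt_irrefl]
  have h3 : (S.drop (k + 1)).countP (fun p => decide (pvLexLt p e)) = 0 := by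
    rw [List.countP_eq_zero]
    intro a ha
    obtain ⟨i, hi, rfl⟩ := List.mem_iff_getElem.mp ha
    rw [List.getElem_drop]
    simp only [decide_eq_true_eq]
    intro hcon
    have hi' : i < S.length - (k + 1) := by simpa using hi
    exact pvLexLt_asymm _ _ hcon (he ▸ h k (k + 1 + i) hk (by omega) (by omega))
  rw [h1, h2, h3]
  simp [List.length_take, Nat.min_eq_left (le_of_lt hk)]

-- counting pvLexLt over enumerate
theorem enum_countP (cs : List Char) (s t : Int) (c : Char) :
    (PySem.List.enumerate cs s).countP (fun p => decide (pvLexLt p (t, c)))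
      = cs.countP (fun d => decide (d < c)) + (cs.take (t - s).toNat).countP (fun d => decide (d = c)) := by
  induction cs generalizing s with
  | nil => simp [PySem.List.enumerate]
  | cons d tl ih =>
    rw [PySem.List.enumerate_cons, List.countP_cons, ih (s + 1)]
    have e1 : (t - (s + 1)).toNat = (t - s - 1).toNat := by omega
    rw [e1]
    by_cases hst : s < t
    · have htn : (t - s).toNat = (t - s - 1).toNat + 1 := by omega
      rw [htn, List.take_succ_cons, List.countP_cons, List.countP_cons]
      simp only [pvLexLt, decide_eq_true_eq]
      by_cases hdc : d < c
      · rw [if_pos (Or.inl hdc), if_pos hdc, if_neg (ne_of_lt hdc)]; omega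
      · by_cases hde : d = c
        · rw [if_pos (Or.inr ⟨hde, hst⟩), if_neg hdc, if_pos hde]; omega
        · rw [if_neg (by tauto), if_neg hdc, if_neg hde]; omega
    · have htn : (t - s).toNat = 0 := by omega
      have htn2 : (t - s - 1).toNat = 0 := by omega
      rw [htn, htn2, List.take_zero, List.take_zero, List.countP_nil, List.countP_cons]
      simp only [pvLexLt, decide_eq_true_eq]
      by_cases hdc : d < c
      · rw [if_pos (Or.inl hdc), if_pos hdc]
      · rw [if_neg (by tauto), if_neg hdc]

-- fold-of-set lemmas
theorem fold_set_len (ps : List (Int × (Int × Char))) (init : List Int) :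
    (ps.foldl (fun acc p => PySem.List.pySetD acc p.2.1 p.1) init).length = init.length := by
  induction ps generalizing init with
  | nil => rfl
  | cons q t ih => rw [List.foldl_cons, ih, PySem.List.length_pySetD]

theorem fold_set_untouched (ps : List (Int × (Int × Char))) (init : List Int) (j : Nat)
    (hne : ∀ p ∈ ps, p.2.1 ≠ (j : Int)) (hpos : ∀ p ∈ ps, 0 ≤ p.2.1) :
    (ps.foldl (fun acc p => PySem.List.pySetD acc p.2.1 p.1) init).getD j 0 = init.getD j 0 := by
  induction ps generalizing init with
  | nil => rfl
  | cons q t ih =>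
    rw [List.foldl_cons, ih _ (fun p hp => hne p (by simp [hp])) (fun p hp => hpos p (by simp [hp]))]
    have h0 : 0 ≤ q.2.1 := hpos q (by simp)
    have hq : q.2.1 = ((q.2.1.toNat : Nat) : Int) := by omega
    rw [hq]
    rcases lt_or_ge q.2.1.toNat init.length with h | h
    · rw [getD_pySetD _ _ _ _ _ h, if_neg]
      intro hjq
      exact hne q (by simp) (by omega)
    · rw [pySetD_of_le _ _ _ h]

theorem fold_set_hit (u v : List (Int × (Int × Char))) (q : Int × (Int × Char)) (init : List Int)
    (j : Nat) (hq : q.2.1 = (j : Int)) (hne : ∀ p ∈ v, p.2.1 ≠ (j : Int))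
    (hpos : ∀ p ∈ v, 0 ≤ p.2.1) (hj : j < init.length) :
    ((u ++ q :: v).foldl (fun acc p => PySem.List.pySetD acc p.2.1 p.1) init).getD j 0 = q.1 := by
  rw [List.foldl_append, List.foldl_cons, fold_set_untouched v _ j hne hpos, hq,
    getD_pySetD _ _ _ _ _ (by rw [fold_set_len]; exact hj)]
  simp

-- fsts of the stably sorted pair list are pairwise distinct
theorem sorted_fst_nodup (cs : List Char) :
    ((PySem.List.sorted (PySem.List.enumerate cs 0) (fun p => p.2) false).map (fun p => p.1)).Nodup := by
  have hperm := (PySem.List.sorted_perm (PySem.List.enumerate cs 0) (fun p => p.2) false).map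
    (fun p : Int × Char => p.1)
  rw [List.Perm.nodup_iff hperm, PySem.List.map_fst_enumerate]
  rw [show (0 : Int) + (cs.length : Int) = ((cs.length : Nat) : Int) by omega,
    PySem.List.pyRange_zero_natCast]
  exact List.nodup_range.map (fun a b => by omega)

-- A's result equals the rank list
theorem A_chain (cs : List Char) :
    ((PySem.List.enumerate
        (PySem.List.sorted (PySem.List.enumerate cs 0) (fun p => p.2) false) 0).foldl
      (fun acc p => PySem.List.pySetD acc p.2.1 p.1)
      ((PySem.List.pyRange 0 (cs.length : Int) 1).map (fun _ => (0 : Int)))) = pvRankList cs := by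
  set S := PySem.List.sorted (PySem.List.enumerate cs 0) (fun p => p.2) false with hS
  have hSlen : S.length = cs.length := by
    rw [hS, PySem.List.length_sorted, PySem.List.length_enumerate]
  have hinit : ((PySem.List.pyRange 0 (cs.length : Int) 1).map (fun _ => (0 : Int))).length
      = cs.length := by
    rw [List.length_map, PySem.List.pyRange_zero_natCast, List.length_map, List.length_range]
  have hpw := sorted_pairwise_lex cs
  rw [← hS] at hpw
  have hnd := sorted_fst_nodup cs
  rw [← hS] at hnd
  apply List.ext_getElem
  · rw [fold_set_len, hinit, pvRankList, List.length_map, List.length_range]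
  · intro j hj hj2
    rw [fold_set_len, hinit] at hj
    -- the element (j, cs[j]) sits somewhere in S
    have hmem : ((j : Int), cs[j]) ∈ S := by
      rw [hS, PySem.List.mem_sorted]
      have := PySem.List.getElem_enumerate cs 0 j (by rwa [PySem.List.length_enumerate])
      rw [show (0 : Int) + (j : Nat) = (j : Int) by omega] at this
      exact this ▸ (PySem.List.enumerate cs 0).getElem_mem _
    obtain ⟨k, hk, hSk⟩ := List.mem_iff_getElem.mp hmem
    have hkE : k < (PySem.List.enumerate S 0).length := by rwa [PySem.List.length_enumerate]
    have hsplit : PySem.List.enumerate S 0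
        = (PySem.List.enumerate S 0).take k
          ++ (PySem.List.enumerate S 0)[k] :: (PySem.List.enumerate S 0).drop (k + 1) := by
      conv_lhs => rw [← List.take_append_drop k (PySem.List.enumerate S 0)]
      rw [List.drop_eq_getElem_cons hkE]
    have hEk : (PySem.List.enumerate S 0)[k] = ((k : Int), S[k]) := by
      rw [PySem.List.getElem_enumerate]
      congr 1
      omega
    have hfst : ∀ m (hm : m < S.length), m ≠ k → S[m].1 ≠ (j : Int) := by
      intro m hm hmk hcon
      have hm' : m < (S.map (fun p => p.1)).length := by simpa using hm
      have hk' : k < (S.map (fun p => p.1)).length := by simpa using hk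
      have h1 : (S.map (fun p => p.1))[m]'hm' = (S.map (fun p => p.1))[k]'hk' := by
        rw [List.getElem_map, List.getElem_map, hcon, hSk]
      exact hmk ((List.Nodup.getElem_inj_iff hnd).mp h1)
    have hdropElem : ∀ (i : Nat) (hi : i < ((PySem.List.enumerate S 0).drop (k + 1)).length),
        ∃ hb : k + 1 + i < S.length,
          ((PySem.List.enumerate S 0).drop (k + 1))[i]'hi = ((0 : Int) + ((k + 1 + i : Nat) : Int), S[k + 1 + i]'hb) := by
      intro i hi
      have hi' : i < (PySem.List.enumerate S 0).length - (k + 1) := by simpa using hi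
      have hb0 : k + 1 + i < (PySem.List.enumerate S 0).length := by omega
      have hb : k + 1 + i < S.length := by rwa [PySem.List.length_enumerate] at hb0
      refine ⟨hb, ?_⟩
      rw [List.getElem_drop, PySem.List.getElem_enumerate]
    have hne : ∀ p ∈ (PySem.List.enumerate S 0).drop (k + 1), p.2.1 ≠ (j : Int) := by
      intro p hp
      obtain ⟨i, hi, rfl⟩ := List.mem_iff_getElem.mp hp
      obtain ⟨hb, heq⟩ := hdropElem i hi
      rw [heq]
      exact hfst (k + 1 + i) hb (by omega)
    have hpos : ∀ p ∈ (PySem.List.enumerate S 0).drop (k + 1), 0 ≤ p.2.1 := by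
      intro p hp
      obtain ⟨i, hi, rfl⟩ := List.mem_iff_getElem.mp hp
      obtain ⟨hb, heq⟩ := hdropElem i hi
      rw [heq]
      have hmem2 : S[k + 1 + i] ∈ S := S.getElem_mem _
      exact enum_fst_ge cs 0 _ ((PySem.List.sorted_perm _ _ _).subset hmem2)
    have hhit := fold_set_hit ((PySem.List.enumerate S 0).take k)
      ((PySem.List.enumerate S 0).drop (k + 1)) ((PySem.List.enumerate S 0)[k]'hkE)
      ((PySem.List.pyRange 0 (cs.length : Int) 1).map (fun _ => (0 : Int))) j
      (by rw [hEk]; simpa using congrArg Prod.fst hSk)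
      hne hpos (by rwa [hinit])
    rw [← hsplit] at hhit
    have hgetd : (List.foldl (fun acc p => PySem.List.pySetD acc p.2.1 p.1)
        (List.map (fun _ => (0:Int)) (PySem.List.pyRange 0 (cs.length : Int) 1))
        (PySem.List.enumerate S 0)).getD j 0 = ((k : Nat) : Int) := by
      rw [hhit, hEk]
    have hjlen : j < (List.foldl (fun acc p => PySem.List.pySetD acc p.2.1 p.1)
        (List.map (fun _ => (0:Int)) (PySem.List.pyRange 0 (cs.length : Int) 1))
        (PySem.List.enumerate S 0)).length := by
      rw [fold_set_len, hinit]; exact hj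
    rw [show (List.foldl (fun acc p => PySem.List.pySetD acc p.2.1 p.1)
        (List.map (fun _ => (0:Int)) (PySem.List.pyRange 0 (cs.length : Int) 1))
        (PySem.List.enumerate S 0))[j]'hjlen
      = (List.foldl (fun acc p => PySem.List.pySetD acc p.2.1 p.1)
        (List.map (fun _ => (0:Int)) (PySem.List.pyRange 0 (cs.length : Int) 1))
        (PySem.List.enumerate S 0)).getD j 0 from (List.getD_eq_getElem _ 0 hjlen).symm, hgetd]
    -- now identify k with the rank
    have hcount := pos_eq_countP S hpw k hk
    rw [hSk] at hcount
    have hperm := PySem.List.sorted_perm (PySem.List.enumerate cs 0) (fun p => p.2) false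
    rw [← hS] at hperm
    rw [List.Perm.countP_eq _ hperm] at hcount
    rw [enum_countP cs 0 (j : Int) cs[j]] at hcount
    have hj0 : ((j : Int) - 0).toNat = j := by omega
    rw [hj0] at hcount
    have hrl : (pvRankList cs)[j]'hj2 = pvRank cs j := by simp [pvRankList]
    rw [hrl]
    unfold pvRank pvCntLt pvCntEq
    have hgd : cs.getD j default = cs[j] := List.getD_eq_getElem cs default hj
    rw [hgd]
    have hc1 : cs.countP (fun d => decide (d.toNat < cs[j].toNat))
        = cs.countP (fun d => decide (d < cs[j])) := by
      apply List.countP_congr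
      intro d _
      simp [char_lt_iff]
    have hc2 : (cs.take j).countP (fun d => decide (d.toNat = cs[j].toNat))
        = (cs.take j).countP (fun d => decide (d = cs[j])) := by
      apply List.countP_congr
      intro d _
      simp [char_eq_iff]
    rw [hc1, hc2]
    omega

theorem A_ranks (i : Int) (s : String) : (gen_pos i s).2 = pvRankList s.toList :=
  A_chain s.toList

theorem dom_chars (i : Int) (s : String) (h : Dom_gen_pos i s) :
    ∀ c ∈ s.toList, c.toNat < 256 := by
  unfold Dom_gen_pos at h
  rw [Bool.and_eq_true] at h
  have h2 := h.2
  unfold pvDomStr at h2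
  rw [List.all_eq_true] at h2
  intro c hcm
  have := h2 c hcm
  unfold pvDomChar at this
  simp only [Bool.or_eq_true, Bool.and_eq_true, decide_eq_true_eq, beq_iff_eq] at this
  omega

-- ===== VERDICT (by name: the statement is the Claim_ definition above) =====
theorem gen_pos_spec : Claim_equal_gen_pos := by
  intro i s hdom
  unfold Spec_gen_pos
  have hA : (gen_pos i s).2 = (gen_pos_alt i s).2 := by
    rw [A_ranks i s, B_ranks i s (dom_chars i s hdom)]
  have h1 : (gen_pos i s).1 = (gen_pos_alt i s).1 := rfl
  exact Prod.ext h1 hA
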